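-- pv_equiv track=rewrite | github.com/cgnl/mulle.js | merge_subtitles.py | whisper_to_subtitle_format
-- ===== SOURCE A (Python) =====
-- from collections import defaultdict
--
-- def whisper_to_subtitle_format(whisper_data):
--     """Convert Whisper format to subtitle format."""
--     # Group by audioId
--     grouped = defaultdict(list)
--     for segment in whisper_data:
--         audio_id = segment['audioId']
--         grouped[audio_id].append(segment['text'])
--
--     # Convert to subtitle format
--     result = {}
--     for audio_id, texts in grouped.items():
--         result[audio_id] = {
--             "lines": texts
--         }
--
--     return result
-- ===== SOURCE B (Python) =====
-- def whisper_to_subtitle_format(whisper_data):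
--     """Convert Whisper format to subtitle format."""
--     # Different algorithm: no incremental grouping table at all.
--     # First compute the distinct audioIds in first-occurrence order,
--     # then for each id rescan the whole input collecting its texts.
--     order = list(dict.fromkeys(segment['audioId'] for segment in whisper_data))
--     return {
--         audio_id: {"lines": [segment['text'] for segment in whisper_data
--                              if segment['audioId'] == audio_id]}
--         for audio_id in order
--     }
-- ===== Notes on version B (the rewrite author's own statement) =====
-- stated objective: alternative
-- what changed: B abandons A's incremental grouping dict entirely: it first computes the distinct audioIds in first-occurrence order (dict.fromkeys) and then, for each id, rescans the whole input collecting that id's texts by filtering, trading A's O(n) single-table build for an O(n*k) per-key rescan with no mutable accumulator.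
import Mathlib
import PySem

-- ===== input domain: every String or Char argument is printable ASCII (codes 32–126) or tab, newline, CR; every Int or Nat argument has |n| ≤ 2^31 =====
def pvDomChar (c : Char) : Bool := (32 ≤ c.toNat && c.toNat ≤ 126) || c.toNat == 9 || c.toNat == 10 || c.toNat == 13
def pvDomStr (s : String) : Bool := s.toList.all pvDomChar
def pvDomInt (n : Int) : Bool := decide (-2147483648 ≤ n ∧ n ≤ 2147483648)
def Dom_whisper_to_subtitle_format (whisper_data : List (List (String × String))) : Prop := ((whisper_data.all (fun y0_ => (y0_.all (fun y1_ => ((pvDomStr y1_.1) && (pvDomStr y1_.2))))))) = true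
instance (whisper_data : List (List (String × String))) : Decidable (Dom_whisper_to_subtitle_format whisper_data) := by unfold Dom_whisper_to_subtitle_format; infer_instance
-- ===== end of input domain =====

-- B replaces A's incremental grouping dict by a per-key rescan: distinct
-- audioIds first (dict.fromkeys), then a filter pass over the input for each
-- id (objective: alternative). Return-value equivalence only.


-- ===== PORT A =====
-- segment['audioId'] / segment['text']: Pre_ guarantees the keys exist; the
-- getD default "" is never reached on admitted inputs.
def whisper_to_subtitle_format (whisper_data : List (List (String × String))) : List (String × List (String × List String)) :=
  -- grouped = defaultdict(list); grouped[audio_id].append(segment['text'])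
  let grouped : PySem.Dict String (List String) :=
    whisper_data.foldl
      (fun g seg =>
        g.modify ((PySem.Dict.mk seg).getD "audioId" "") []
          (fun ts => ts ++ [(PySem.Dict.mk seg).getD "text" ""]))
      PySem.Dict.empty
  -- result = {}; for audio_id, texts in grouped.items(): result[audio_id] = {"lines": texts}
  let result : PySem.Dict String (List (String × List String)) :=
    grouped.items.foldl (fun r p => r.insert p.1 [("lines", p.2)]) PySem.Dict.empty
  result.items

-- ===== PORT B =====
-- order = list(dict.fromkeys(...)) is PySem.List.dedup of the audioId list;
-- the dict comprehension inserts each distinct id with its filtered texts.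
def whisper_to_subtitle_format_alt (whisper_data : List (List (String × String))) : List (String × List (String × List String)) :=
  let order : List String :=
    PySem.List.dedup (whisper_data.map (fun seg => (PySem.Dict.mk seg).getD "audioId" ""))
  (order.foldl
      (fun r aid =>
        r.insert aid
          [("lines",
            (whisper_data.filter
                (fun seg => (PySem.Dict.mk seg).getD "audioId" "" == aid)).map
              (fun seg => (PySem.Dict.mk seg).getD "text" ""))])
      (PySem.Dict.empty : PySem.Dict String (List (String × List String)))).items

-- ===== PRECONDITION & SPEC =====
-- Pre_ excludes exactly the inputs where Python A raises KeyError: a segment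
-- missing the 'audioId' or 'text' key.
def Pre_whisper_to_subtitle_format (whisper_data : List (List (String × String))) : Prop :=
  ∀ seg ∈ whisper_data, "audioId" ∈ seg.map Prod.fst ∧ "text" ∈ seg.map Prod.fst
instance (whisper_data : List (List (String × String))) : Decidable (Pre_whisper_to_subtitle_format whisper_data) := by unfold Pre_whisper_to_subtitle_format; infer_instance

def pvWitness_whisper_to_subtitle_format : (List (List (String × String))) :=
  [[("audioId", "a"), ("text", "hi")], [("audioId", "b"), ("text", "yo")], [("audioId", "a"), ("text", "!")]]

def Spec_whisper_to_subtitle_format (whisper_data : List (List (String × String))) (out : List (String × List (String × List String))) : Prop := out = whisper_to_subtitle_format_alt whisper_data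
instance (whisper_data : List (List (String × String))) (out : List (String × List (String × List String))) : Decidable (Spec_whisper_to_subtitle_format whisper_data out) := by unfold Spec_whisper_to_subtitle_format; infer_instance

-- ===== CLAIM =====
def Claim_equal_whisper_to_subtitle_format : Prop := ∀ (whisper_data : List (List (String × String))), Dom_whisper_to_subtitle_format whisper_data → Pre_whisper_to_subtitle_format whisper_data → Spec_whisper_to_subtitle_format whisper_data (whisper_to_subtitle_format whisper_data)

-- ===== LEMMAS AND PROOFS =====

-- the audioId key of a segment
def pvAid (seg : List (String × String)) : String := (PySem.Dict.mk seg).getD "audioId" ""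
-- the texts of the segments of wd whose audioId is aid, in order
def pvTexts (wd : List (List (String × String))) (aid : String) : List String :=
  (wd.filter (fun seg => pvAid seg == aid)).map (fun seg => (PySem.Dict.mk seg).getD "text" "")

-- A's grouping loop characterised: getD at any key is exactly pvTexts
theorem pvGrouped_getD (wd : List (List (String × String))) (c : String) :
    (wd.foldl
        (fun g seg =>
          g.modify ((PySem.Dict.mk seg).getD "audioId" "") []
            (fun ts => ts ++ [(PySem.Dict.mk seg).getD "text" ""]))
        PySem.Dict.empty).getD c []
      = pvTexts wd c := by
  have h :
      wd.foldl
        (fun g seg =>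
          g.modify ((PySem.Dict.mk seg).getD "audioId" "") []
            (fun ts => ts ++ [(PySem.Dict.mk seg).getD "text" ""]))
        PySem.Dict.empty
        = (wd.map (fun seg => (pvAid seg, (PySem.Dict.mk seg).getD "text" ""))).foldl
            (fun d p => d.modify p.1 [] (fun ts => ts ++ [p.2])) PySem.Dict.empty := by
    rw [List.foldl_map]; rfl
  rw [h, PySem.Dict.getD_foldl_modify_append]
  simp [pvTexts, List.filter_map, List.map_map, Function.comp_def]

-- A's grouping loop's keys are the distinct audioIds in first-occurrence order
theorem pvGrouped_keys (wd : List (List (String × String))) :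
    (wd.foldl
        (fun g seg =>
          g.modify ((PySem.Dict.mk seg).getD "audioId" "") []
            (fun ts => ts ++ [(PySem.Dict.mk seg).getD "text" ""]))
        PySem.Dict.empty).keys
      = PySem.List.dedup (wd.map pvAid) := by
  rw [PySem.Dict.keys_foldl_modify_key]
  simp only [PySem.Dict.keys_empty, PySem.Set.update_nil_left, PySem.List.dedup_eq_ofList]
  rfl

-- ===== VERDICT =====
theorem whisper_to_subtitle_format_spec : Claim_equal_whisper_to_subtitle_format := by
  intro wd _ _
  unfold Spec_whisper_to_subtitle_format whisper_to_subtitle_format whisper_to_subtitle_format_alt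
  set G := wd.foldl
      (fun g seg =>
        g.modify ((PySem.Dict.mk seg).getD "audioId" "") []
          (fun ts => ts ++ [(PySem.Dict.mk seg).getD "text" ""])) PySem.Dict.empty with hG
  have hnd : G.keys.Nodup := by
    rw [hG]
    exact PySem.Dict.nodup_keys_foldl_modify_key wd
      (fun seg => (PySem.Dict.mk seg).getD "audioId" "") []
      (fun _ seg ts => ts ++ [(PySem.Dict.mk seg).getD "text" ""]) PySem.Dict.empty
      PySem.Dict.nodup_keys_empty
  -- A side: fresh distinct inserts append, so the result items are a map over G.items
  have hA := PySem.Dict.items_foldl_insert_fresh G.items Prod.fst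
      (fun p => [("lines", p.2)])
      (PySem.Dict.empty : PySem.Dict String (List (String × List String)))
      (fun p _ => PySem.Dict.contains_empty _) hnd
  -- B side: order is nodup, fresh inserts append
  have hOrder : (PySem.List.dedup (wd.map (fun seg => (PySem.Dict.mk seg).getD "audioId" ""))).Nodup :=
    PySem.List.nodup_dedup _
  have hB := PySem.Dict.items_foldl_insert_fresh
      (PySem.List.dedup (wd.map (fun seg => (PySem.Dict.mk seg).getD "audioId" "")))
      id
      (fun aid =>
        [("lines",
          (wd.filter (fun seg => (PySem.Dict.mk seg).getD "audioId" "" == aid)).map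
            (fun seg => (PySem.Dict.mk seg).getD "text" ""))])
      (PySem.Dict.empty : PySem.Dict String (List (String × List String)))
      (fun a _ => PySem.Dict.contains_empty _) (by simp only [List.map_id]; exact hOrder)
  simp only [id] at hB
  rw [hA, hB]
  -- both are maps over the distinct audioIds with the grouped texts
  rw [PySem.Dict.items_eq_map_keys G hnd []]
  rw [show G.keys = PySem.List.dedup (wd.map pvAid) from pvGrouped_keys wd]
  have he : (PySem.Dict.empty : PySem.Dict String (List (String × List String))).items = [] := rfl
  simp only [he, List.nil_append, List.map_map]
  apply List.map_congr_left
  intro k _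
  have := pvGrouped_getD wd k
  rw [← hG] at this
  simp [this, pvTexts, pvAid]
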